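-- pv_equiv track=rewrite | github.com/kumikoda/cryptopals-python | crypto/english.py | get_letter_counts
-- ===== SOURCE A (Python) =====
-- def get_letter_counts(s):
--     counts = {
--         'a': 0,
--         'b': 0,
--         'c': 0,
--         'd': 0,
--         'e': 0,
--         'f': 0,
--         'g': 0,
--         'h': 0,
--         'i': 0,
--         'j': 0,
--         'k': 0,
--         'l': 0,
--         'm': 0,
--         'n': 0,
--         'o': 0,
--         'p': 0,
--         'q': 0,
--         'r': 0,
--         's': 0,
--         't': 0,
--         'u': 0,
--         'v': 0,
--         'w': 0,
--         'x': 0,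
--         'y': 0,
--         'z': 0,
--         ' ': 0,
--     }
--     for c in s:
--         if c in counts:
--             counts[c] += 1
--     return counts
-- ===== SOURCE B (Python) =====
-- def get_letter_counts(s):
--     # No accumulator dict at all: one independent scan of s per tracked key,
--     # via str.count, assembled by a dict comprehension over the 27 keys.
--     return {c: s.count(c) for c in 'abcdefghijklmnopqrstuvwxyz '}
-- ===== Notes on version B (the rewrite author's own statement) =====
-- stated objective: idiomatic
-- what changed: A threads one mutable 27-key dict through a single conditional pass over s; B keeps no running state at all and instead performs an independent str.count scan of s for each of the 27 keys, assembling the result with a dict comprehension.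
import Mathlib
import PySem

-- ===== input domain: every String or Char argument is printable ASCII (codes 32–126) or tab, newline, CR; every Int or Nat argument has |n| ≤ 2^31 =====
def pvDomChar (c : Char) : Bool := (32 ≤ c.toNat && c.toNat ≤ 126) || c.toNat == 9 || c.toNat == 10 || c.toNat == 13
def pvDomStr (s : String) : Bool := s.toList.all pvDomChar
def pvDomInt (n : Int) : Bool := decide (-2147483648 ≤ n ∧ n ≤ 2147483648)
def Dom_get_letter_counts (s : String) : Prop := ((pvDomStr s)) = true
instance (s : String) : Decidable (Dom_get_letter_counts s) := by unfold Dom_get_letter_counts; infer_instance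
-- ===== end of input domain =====

-- B keeps no running state: one independent str.count scan per tracked key, assembled by a comprehension; same result, same O(n) class.

-- ===== PORT A =====
-- the literal 27-key dict A starts from
def pvCounts0 : PySem.Dict String Int := PySem.Dict.ofList
  [("a",0),("b",0),("c",0),("d",0),("e",0),("f",0),("g",0),("h",0),("i",0),
   ("j",0),("k",0),("l",0),("m",0),("n",0),("o",0),("p",0),("q",0),("r",0),
   ("s",0),("t",0),("u",0),("v",0),("w",0),("x",0),("y",0),("z",0),(" ",0)]

def get_letter_counts (s : String) : List (String × Int) :=
  (s.toList.foldl
    (fun d c =>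
      if d.contains (String.singleton c) then d.modify (String.singleton c) 0 (· + 1) else d)
    pvCounts0).items

-- ===== PORT B =====
def get_letter_counts_alt (s : String) : List (String × Int) :=
  "abcdefghijklmnopqrstuvwxyz ".toList.map
    (fun c => (String.singleton c, (PySem.Str.count s (String.singleton c) : Int)))

-- ===== PRECONDITION & SPEC =====
def Spec_get_letter_counts (s : String) (out : List (String × Int)) : Prop := out = get_letter_counts_alt s
instance (s : String) (out : List (String × Int)) : Decidable (Spec_get_letter_counts s out) := by unfold Spec_get_letter_counts; infer_instance

-- ===== CLAIM (what is proved, stated in full; the proofs are below) =====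
def Claim_equal_get_letter_counts : Prop := ∀ (s : String), Dom_get_letter_counts s → Spec_get_letter_counts s (get_letter_counts s)

-- ===== LEMMAS AND PROOFS =====

def pvAlpha : List Char := "abcdefghijklmnopqrstuvwxyz ".toList

def pvStepA (d : PySem.Dict String Int) (c : Char) : PySem.Dict String Int :=
  if d.contains (String.singleton c) then d.modify (String.singleton c) 0 (· + 1) else d

lemma singleton_inj {a b : Char} (h : a ≠ b) : String.singleton a ≠ String.singleton b := by
  intro hs
  exact h (by simpa using congrArg String.toList hs)

lemma stepA_keys (d : PySem.Dict String Int) (c : Char) : (pvStepA d c).keys = d.keys := by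
  unfold pvStepA
  split
  · rename_i h
    rw [PySem.Dict.keys_modify]
    exact PySem.Dict.keys_insert_of_contains _ _ h
  · rfl

lemma stepA_contains (d : PySem.Dict String Int) (c : Char) (t : String) :
    (pvStepA d c).contains t = d.contains t := by
  rw [PySem.Dict.contains_eq_decide_mem_keys, PySem.Dict.contains_eq_decide_mem_keys, stepA_keys]

lemma loopA_keys (l : List Char) (d : PySem.Dict String Int) :
    (l.foldl pvStepA d).keys = d.keys := by
  induction l generalizing d with
  | nil => rfl
  | cons x xs ih => simp [List.foldl_cons, ih, stepA_keys]

lemma loopA_nodup (l : List Char) (d : PySem.Dict String Int) (h : d.keys.Nodup) :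
    (l.foldl pvStepA d).keys.Nodup := by
  rw [loopA_keys]; exact h

lemma loopA_getD (l : List Char) (d : PySem.Dict String Int) (c : Char)
    (hc : d.contains (String.singleton c) = true) :
    (l.foldl pvStepA d).getD (String.singleton c) 0
      = d.getD (String.singleton c) 0 + (l.count c : Int) := by
  induction l generalizing d with
  | nil => simp
  | cons x xs ih =>
    rw [List.foldl_cons, ih _ (by rw [stepA_contains]; exact hc)]
    by_cases hx : x = c
    · subst hx
      unfold pvStepA
      rw [if_pos hc, PySem.Dict.getD_modify_self]
      simp
      ring
    · have hne : String.singleton c ≠ String.singleton x := singleton_inj (Ne.symm hx)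
      have : (pvStepA d x).getD (String.singleton c) 0 = d.getD (String.singleton c) 0 := by
        unfold pvStepA
        split
        · exact PySem.Dict.getD_modify_of_ne _ _ _ hne
        · rfl
      rw [this]
      simp [hx]

-- s.count(c) for a single character c is the character count of the list
lemma count_go_single (c : Char) :
    ∀ (fuel : Nat) (l : List Char) (acc : Nat), l.length ≤ fuel →
      PySem.Chars.count.go [c] fuel l acc = acc + l.count c := by
  intro fuel
  induction fuel with
  | zero =>
    intro l acc h
    have : l = [] := List.eq_nil_of_length_eq_zero (Nat.le_zero.mp h)
    subst this
    simp [PySem.Chars.count.go]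
  | succ n ih =>
    intro l acc h
    cases l with
    | nil => simp [PySem.Chars.count.go]
    | cons x xs =>
      simp only [PySem.Chars.count.go]
      by_cases hx : x = c
      · subst hx
        have hp : List.isPrefixOf [x] (x :: xs) = true := by simp [List.isPrefixOf]
        rw [if_pos hp]
        simp only [List.length_cons] at h
        rw [ih _ _ (by simpa using Nat.lt_succ_iff.mp (Nat.lt_of_lt_of_le (Nat.lt_succ_self _) h))]
        simp
        omega
      · have hp : List.isPrefixOf [c] (x :: xs) = false := by
          simp [List.isPrefixOf]
          exact fun he => absurd he.symm hx
        rw [if_neg (by simp [hp])]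
        simp only [List.length_cons] at h
        rw [ih _ _ (Nat.le_of_succ_le_succ h)]
        simp [hx]

lemma chars_count_single (s : List Char) (c : Char) :
    PySem.Chars.count s [c] = s.count c := by
  unfold PySem.Chars.count
  rw [if_neg (by simp)]
  simpa using count_go_single c s.length s 0 (le_refl _)

lemma str_count_single (s : String) (c : Char) :
    PySem.Str.count s (String.singleton c) = s.toList.count c := by
  rw [show PySem.Str.count s (String.singleton c)
        = PySem.Chars.count s.toList (String.singleton c).toList from by
      simp [PySem.Str.count]]
  simp [chars_count_single]

set_option maxRecDepth 8192 in
lemma counts0_keys : pvCounts0.keys = pvAlpha.map String.singleton := by rfl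

set_option maxRecDepth 8192 in
lemma counts0_contains_all : pvAlpha.all (fun c => pvCounts0.contains (String.singleton c)) = true := by rfl

set_option maxRecDepth 8192 in
lemma counts0_getD_all : pvAlpha.all (fun c => pvCounts0.getD (String.singleton c) 0 == 0) = true := by rfl

lemma counts0_contains (c : Char) (h : c ∈ pvAlpha) : pvCounts0.contains (String.singleton c) = true :=
  List.all_eq_true.mp counts0_contains_all c h

lemma counts0_getD (c : Char) (h : c ∈ pvAlpha) : pvCounts0.getD (String.singleton c) 0 = 0 := by
  have := List.all_eq_true.mp counts0_getD_all c h
  simpa using this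

lemma counts0_nodup : pvCounts0.keys.Nodup := by
  rw [counts0_keys]
  refine List.Nodup.map ?_ (by decide)
  intro a b hab
  by_contra hne
  exact singleton_inj hne hab

-- ===== VERDICT (by name: the statement is the Claim_ definition above) =====

theorem get_letter_counts_spec : Claim_equal_get_letter_counts := by
  intro s _
  unfold Spec_get_letter_counts get_letter_counts get_letter_counts_alt
  show (s.toList.foldl pvStepA pvCounts0).items = _
  rw [PySem.Dict.items_eq_map_keys _ (loopA_nodup _ _ counts0_nodup) 0,
      loopA_keys, counts0_keys, List.map_map]
  apply List.map_congr_left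
  intro c hc
  simp only [Function.comp_apply]
  rw [loopA_getD _ _ _ (counts0_contains c hc), counts0_getD c hc, str_count_single]
  simp
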